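-- pv_equiv track=rewrite | github.com/FakeBlubba/FrameDeployer | subtitles.py | process_chunk_data
-- ===== SOURCE A (Python) =====
-- def format_timestamp(milliseconds):
--     # Converti i millisecondi in ore, minuti, secondi, e millisecondi
--     hours = milliseconds // (1000*60*60)
--     milliseconds -= hours * (1000*60*60)
--     minutes = milliseconds // (1000*60)
--     milliseconds -= minutes * (1000*60)
--     seconds = milliseconds // 1000
--     milliseconds -= seconds * 1000
--
--     # Formatta le ore, i minuti, i secondi, e i millisecondi in una stringa SRT
--     return f"{hours:02}:{minutes:02}:{seconds:02},{milliseconds:03}"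
--
-- def process_chunk_data(chunk_data):
--     chunk_data_processed = []
--     complete_duration = 0
--     for index, chunk in enumerate(chunk_data):
--         start_time = complete_duration
--         complete_duration += chunk[1]
--         end_time = complete_duration
--         chunk_data_processed.append([chunk[0], format_timestamp(start_time), format_timestamp(end_time)])
--     return chunk_data_processed
-- ===== SOURCE B (Python) =====
-- def format_timestamp(milliseconds):
--     total_seconds = milliseconds // 1000
--     ms = milliseconds % 1000
--     hours = total_seconds // 3600
--     minutes = total_seconds % 3600 // 60
--     seconds = total_seconds % 60
--     return f"{hours:02}:{minutes:02}:{seconds:02},{ms:03}"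
--
-- def process_chunk_data(chunk_data):
--     # Two passes: first materialize the boundary table of cumulative
--     # durations (n+1 timestamps), then pair consecutive boundaries.
--     bounds = [0]
--     for _, duration in chunk_data:
--         bounds.append(bounds[-1] + duration)
--     return [[text, format_timestamp(start), format_timestamp(end)]
--             for (text, _), start, end in zip(chunk_data, bounds, bounds[1:])]
-- ===== Notes on version B (the rewrite author's own statement) =====
-- stated objective: alternative
-- what changed: B replaces A's single emit loop carrying a running-duration accumulator by a two-pass decomposition: it first materializes the full boundary table of cumulative durations, then zips consecutive boundary pairs with the titles; the timestamp formatter is rewritten from repeated subtract-off division to seconds-based div/mod.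
import Mathlib
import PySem

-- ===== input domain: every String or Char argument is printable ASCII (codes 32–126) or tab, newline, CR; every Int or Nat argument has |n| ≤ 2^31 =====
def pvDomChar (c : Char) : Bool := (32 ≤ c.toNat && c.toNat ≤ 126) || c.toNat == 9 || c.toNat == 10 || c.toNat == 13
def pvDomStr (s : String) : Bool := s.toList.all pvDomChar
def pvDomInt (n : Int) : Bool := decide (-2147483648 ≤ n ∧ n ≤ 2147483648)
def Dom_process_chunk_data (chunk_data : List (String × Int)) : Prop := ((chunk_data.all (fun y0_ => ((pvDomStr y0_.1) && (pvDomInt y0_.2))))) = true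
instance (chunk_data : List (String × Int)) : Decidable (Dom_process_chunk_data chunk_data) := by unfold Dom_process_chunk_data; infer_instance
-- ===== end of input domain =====

-- B recomputes the same rows from a materialized boundary table (built first, zipped second)
-- instead of A's single loop with a running accumulator; same O(n) cost, alternative structure.

-- ===== PORT A =====
-- f"{n:0w}" for an int n equals str(n).zfill(w): PySem.Str.zfill (PySem.Int.toStr n) w (exact).
def format_timestamp (milliseconds : Int) : String :=
  let hours := PySem.Int.floordiv milliseconds (1000*60*60)
  let ms1 := milliseconds - hours * (1000*60*60)
  let minutes := PySem.Int.floordiv ms1 (1000*60)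
  let ms2 := ms1 - minutes * (1000*60)
  let seconds := PySem.Int.floordiv ms2 1000
  let ms3 := ms2 - seconds * 1000
  PySem.Str.zfill (PySem.Int.toStr hours) 2 ++ ":" ++ PySem.Str.zfill (PySem.Int.toStr minutes) 2
    ++ ":" ++ PySem.Str.zfill (PySem.Int.toStr seconds) 2 ++ "," ++ PySem.Str.zfill (PySem.Int.toStr ms3) 3

def process_chunk_data (chunk_data : List (String × Int)) : List (List String) :=
  ((PySem.List.enumerate chunk_data).foldl
    (fun (st : List (List String) × Int) ic =>
      let start_time := st.2
      let complete_duration := st.2 + ic.2.2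
      (st.1 ++ [[ic.2.1, format_timestamp start_time, format_timestamp complete_duration]],
       complete_duration))
    ([], 0)).1

-- ===== PORT B =====
def format_timestamp_alt (milliseconds : Int) : String :=
  let total_seconds := PySem.Int.floordiv milliseconds 1000
  let ms := PySem.Int.mod milliseconds 1000
  let hours := PySem.Int.floordiv total_seconds 3600
  let minutes := PySem.Int.floordiv (PySem.Int.mod total_seconds 3600) 60
  let seconds := PySem.Int.mod total_seconds 60
  PySem.Str.zfill (PySem.Int.toStr hours) 2 ++ ":" ++ PySem.Str.zfill (PySem.Int.toStr minutes) 2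
    ++ ":" ++ PySem.Str.zfill (PySem.Int.toStr seconds) 2 ++ "," ++ PySem.Str.zfill (PySem.Int.toStr ms) 3

-- zip of three lists fused with the comprehension's map (exact); bounds[1:] is PySem.List.slice.
def process_chunk_data_alt (chunk_data : List (String × Int)) : List (List String) :=
  let bounds := chunk_data.foldl (fun bs p => bs ++ [bs.getLast! + p.2]) [0]
  List.zipWith3
    (fun (p : String × Int) s e => [p.1, format_timestamp_alt s, format_timestamp_alt e])
    chunk_data bounds (PySem.List.slice bounds (some 1) none)

-- ===== PRECONDITION & SPEC =====
def Spec_process_chunk_data (chunk_data : List (String × Int)) (out : List (List String)) : Prop := out = process_chunk_data_alt chunk_data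
instance (chunk_data : List (String × Int)) (out : List (List String)) : Decidable (Spec_process_chunk_data chunk_data out) := by unfold Spec_process_chunk_data; infer_instance

-- ===== CLAIM (what is proved, stated in full; the proofs are below) =====
def Claim_equal_process_chunk_data : Prop := ∀ (chunk_data : List (String × Int)), Dom_process_chunk_data chunk_data → Spec_process_chunk_data chunk_data (process_chunk_data chunk_data)

-- ===== LEMMAS AND PROOFS =====

-- the two formatters agree on every Int
lemma fmt_eq (n : Int) : format_timestamp n = format_timestamp_alt n := by
  have d1 : ∀ a : Int, PySem.Int.floordiv a 3600000 = a / 3600000 :=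
    fun a => PySem.Int.floordiv_eq_ediv_of_pos (by norm_num)
  have d2 : ∀ a : Int, PySem.Int.floordiv a 60000 = a / 60000 :=
    fun a => PySem.Int.floordiv_eq_ediv_of_pos (by norm_num)
  have d3 : ∀ a : Int, PySem.Int.floordiv a 1000 = a / 1000 :=
    fun a => PySem.Int.floordiv_eq_ediv_of_pos (by norm_num)
  have d4 : ∀ a : Int, PySem.Int.floordiv a 3600 = a / 3600 :=
    fun a => PySem.Int.floordiv_eq_ediv_of_pos (by norm_num)
  have d5 : ∀ a : Int, PySem.Int.floordiv a 60 = a / 60 :=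
    fun a => PySem.Int.floordiv_eq_ediv_of_pos (by norm_num)
  have m3 : ∀ a : Int, PySem.Int.mod a 1000 = a % 1000 :=
    fun a => PySem.Int.mod_eq_emod_of_pos (by norm_num)
  have m4 : ∀ a : Int, PySem.Int.mod a 3600 = a % 3600 :=
    fun a => PySem.Int.mod_eq_emod_of_pos (by norm_num)
  have m5 : ∀ a : Int, PySem.Int.mod a 60 = a % 60 :=
    fun a => PySem.Int.mod_eq_emod_of_pos (by norm_num)
  simp only [format_timestamp, format_timestamp_alt, d3, d4, d5, m3, m4, m5]
  norm_num [d1, d2]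
  rw [show n / 3600000 = n / 1000 / 3600 by omega,
      show (n - n / 1000 / 3600 * 3600000) / 60000 = n / 1000 % 3600 / 60 by omega,
      show (n - n / 1000 / 3600 * 3600000 - n / 1000 % 3600 / 60 * 60000) / 1000 = n / 1000 % 60 by omega,
      show n - n / 1000 / 3600 * 3600000 - n / 1000 % 3600 / 60 * 60000 - n / 1000 % 60 * 1000 = n % 1000 by omega]

-- proof-only boundary table: c, then successive cumulative sums
def cumulative_bounds (start : Int) : List (String × Int) → List Int
  | [] => [start]
  | c :: rest => start :: cumulative_bounds (start + c.2) rest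

lemma bounds_eq : ∀ (l : List (String × Int)) (pre : List Int) (c : Int),
    l.foldl (fun bs p => bs ++ [bs.getLast! + p.2]) (pre ++ [c]) = pre ++ cumulative_bounds c l := by
  intro l
  induction l with
  | nil => intro pre c; simp [cumulative_bounds]
  | cons p rest ih =>
    intro pre c
    have hlast : (pre ++ [c]).getLast! = c := by simp
    simp only [List.foldl_cons, hlast]
    have : pre ++ [c] ++ [c + p.2] = (pre ++ [c]) ++ [c + p.2] := rfl
    rw [this, ih (pre ++ [c]) (c + p.2)]
    simp [cumulative_bounds, List.append_assoc]

lemma cb_head : ∀ (c : Int) (l : List (String × Int)),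
    cumulative_bounds c l = c :: (cumulative_bounds c l).tail := by
  intro c l; cases l <;> simp [cumulative_bounds]

lemma loop_eq : ∀ (l : List (String × Int)) (k c : Int) (acc : List (List String)),
    ((PySem.List.enumerate l k).foldl
      (fun (st : List (List String) × Int) ic =>
        (st.1 ++ [[ic.2.1, format_timestamp st.2, format_timestamp (st.2 + ic.2.2)]],
         st.2 + ic.2.2))
      (acc, c)).1
    = acc ++ List.zipWith3
        (fun (p : String × Int) s e => [p.1, format_timestamp s, format_timestamp e])
        l (cumulative_bounds c l) ((cumulative_bounds c l).tail) := by
  intro l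
  induction l with
  | nil => intro k c acc; simp [PySem.List.enumerate_nil, List.zipWith3]
  | cons p rest ih =>
    intro k c acc
    rw [PySem.List.enumerate_cons]
    simp only [List.foldl_cons]
    rw [ih (k+1) (c + p.2) (acc ++ [[p.1, format_timestamp c, format_timestamp (c + p.2)]])]
    conv_rhs => rw [show cumulative_bounds c (p :: rest) = c :: cumulative_bounds (c + p.2) rest from rfl,
                    cb_head (c + p.2) rest]
    simp only [List.append_assoc, List.cons_append, List.nil_append]
    conv_lhs => rw [cb_head (c + p.2) rest]
    rfl

-- ===== VERDICT (by name: the statement is the Claim_ definition above) =====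
theorem process_chunk_data_spec : Claim_equal_process_chunk_data := by
  intro cd _
  unfold Spec_process_chunk_data process_chunk_data process_chunk_data_alt
  rw [show ([0] : List Int) = [] ++ [0] from rfl, bounds_eq cd [] 0]
  simp only [List.nil_append, PySem.List.slice_from_one]
  have := loop_eq cd 0 0 []
  simp only [List.nil_append] at this
  rw [this]
  simp only [fmt_eq]
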